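-- pv_equiv track=rewrite | github.com/Jeffrey04/aoc | 2024/day19/aoc2024-d19-python/src/aoc2024_d19_python/day19.py | pattern_match
-- ===== SOURCE A (Python) =====
-- from dataclasses import dataclass, field, is_dataclass, make_dataclass
-- from queue import PriorityQueue
--
-- @dataclass(order=True)
-- class Node:
--     cost: int
--     towel: str = field(compare=False)
--     progress: str = field(compare=False)
--
-- def pattern_match(towels: tuple[str, ...], pattern: str) -> dict[str, set[str]] | None:
--     open = PriorityQueue()
--     visited = {}
--     combinations: dict[str, set[str]] = {}
--
--     for towel in towels:
--         if pattern.startswith(towel):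
--             combinations[towel] = {
--                 towel,
--             }
--             open.put(Node(len(combinations[towel]), towel, towel))
--
--     while not open.empty():
--         current = open.get()
--
--         if current.progress == pattern or visited.get(
--             (current.progress, current.towel)
--         ):
--             continue
--
--         visited[(current.progress, current.towel)] = True
--
--         for towel in towels:
--             progress_incoming = current.progress + towel
--
--             if pattern.startswith(progress_incoming):
--                 combinations[progress_incoming] = combinations.get(
--                     progress_incoming, set()
--                 ).union({f"{{{current.progress}}};{towel}"})
--                 open.put(
--                     Node(len(combinations[progress_incoming]), towel, progress_incoming)
--                 )
--
--     return combinations if pattern in combinations else None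
-- ===== SOURCE B (Python) =====
-- def pattern_match(towels, pattern):
--     # Single forward DP over pattern positions: seed the prefixes reachable by
--     # one towel, then extend each reachable prefix once, left to right.
--     n = len(pattern)
--     combinations = {}
--     for towel in towels:
--         if pattern.startswith(towel):
--             combinations[towel] = {towel}
--     for i in range(n):
--         prefix = pattern[:i]
--         if prefix in combinations:
--             for towel in towels:
--                 if pattern.startswith(towel, i):
--                     combinations.setdefault(prefix + towel, set()).add(
--                         f"{{{prefix}}};{towel}"
--                     )
--     return combinations if pattern in combinations else None
-- ===== Notes on version B (the rewrite author's own statement) =====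
-- stated objective: simpler
-- what changed: Replaces the priority-queue worklist with per-(prefix,towel) visited bookkeeping by a single forward DP over pattern positions that extends each reachable prefix exactly once, recording the same edge labels.
import Mathlib
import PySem

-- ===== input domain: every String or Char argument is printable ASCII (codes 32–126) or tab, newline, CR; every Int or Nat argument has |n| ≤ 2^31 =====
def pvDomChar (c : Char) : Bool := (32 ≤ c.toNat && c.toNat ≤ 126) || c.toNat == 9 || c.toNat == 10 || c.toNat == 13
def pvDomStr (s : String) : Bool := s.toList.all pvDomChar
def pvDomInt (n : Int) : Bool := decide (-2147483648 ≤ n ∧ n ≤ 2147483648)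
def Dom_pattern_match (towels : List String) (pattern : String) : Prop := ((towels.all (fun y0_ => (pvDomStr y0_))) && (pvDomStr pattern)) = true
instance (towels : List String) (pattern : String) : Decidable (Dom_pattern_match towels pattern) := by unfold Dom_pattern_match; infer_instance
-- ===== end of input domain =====

-- B replaces A's priority-queue worklist by a single forward DP over pattern positions (same dict of edge labels).
-- Shared helpers: dict[str, set[str]] is modelled as an insertion-ordered association list over List Char
-- with set values as ordered duplicate-free lists (PySem conventions; exact on ASCII strings).

def pvLookup : List (List Char × List (List Char)) → List Char → Option (List (List Char))
  | [], _ => none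
  | (k, v) :: rest, key => if k = key then some v else pvLookup rest key

def pvHasKey (cb : List (List Char × List (List Char))) (k : List Char) : Bool :=
  (pvLookup cb k).isSome

def pvSetAdd (s : List (List Char)) (e : List Char) : List (List Char) :=
  if e ∈ s then s else s ++ [e]

def pvCombAdd : List (List Char × List (List Char)) → List Char → List Char → List (List Char × List (List Char))
  | [], key, e => [(key, [e])]
  | (k, v) :: rest, key, e =>
    if k = key then (k, pvSetAdd v e) :: rest else (k, v) :: pvCombAdd rest key e

def pvCombSet : List (List Char × List (List Char)) → List Char → List (List Char) → List (List Char × List (List Char))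
  | [], key, v => [(key, v)]
  | (k, w) :: rest, key, v =>
    if k = key then (k, v) :: rest else (k, w) :: pvCombSet rest key v

-- f"{{{progress}}};{towel}"
def pvEdge (p t : List Char) : List Char := '{' :: (p ++ '}' :: ';' :: t)

-- ===== PORT A =====
-- PriorityQueue.get(): removes a minimal-cost node (ties: shorter progress first, then insertion
-- order; Python's order among equal-priority nodes is heap-internal and not observable in the result).
def pvPopMin : List (Nat × List Char × List Char) → Option ((Nat × List Char × List Char) × List (Nat × List Char × List Char))
  | [] => none
  | x :: xs =>
    match pvPopMin xs with
    | none => some (x, [])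
    | some (m, rest) =>
      if x.1 < m.1 ∨ (x.1 = m.1 ∧ x.2.2.length ≤ m.2.2.length) then some (x, xs)
      else some (m, x :: rest)

-- the inner 'for towel in towels' of A's while-loop body: updates combinations and collects the puts
def pvExpand (T : List (List Char)) (P prog : List Char) (comb : List (List Char × List (List Char))) :
    List (List Char × List (List Char)) × List (Nat × List Char × List Char) :=
  T.foldl
    (fun s t =>
      let pi := prog ++ t
      if pi.isPrefixOf P then
        let cb := pvCombAdd s.1 pi (pvEdge prog t)
        (cb, s.2 ++ [(((pvLookup cb pi).getD []).length, t, pi)])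
      else s)
    (comb, [])

-- A's 'while not open.empty()' loop (fuel makes the recursion total; the proof shows it suffices)
def pvLoopA (T : List (List Char)) (P : List Char) :
    Nat → List (List Char × List (List Char)) → List (List Char × List Char) →
    List (Nat × List Char × List Char) → List (List Char × List (List Char))
  | 0, comb, _, _ => comb
  | fuel + 1, comb, visited, queue =>
    match pvPopMin queue with
    | none => comb
    | some ((_, tw, prog), rest) =>
      if prog = P ∨ (prog, tw) ∈ visited then pvLoopA T P fuel comb visited rest
      else
        let ex := pvExpand T P prog comb
        pvLoopA T P fuel ex.1 (visited ++ [(prog, tw)]) (rest ++ ex.2)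

def pattern_match (towels : List String) (pattern : String) : Option (List (String × List String)) :=
  let T := towels.map String.toList
  let P := pattern.toList
  let init := T.foldl
    (fun s t =>
      if t.isPrefixOf P then
        let cb := pvCombSet s.1 t [t]
        (cb, s.2 ++ [(((pvLookup cb t).getD []).length, t, t)])
      else s)
    ([], [])
  let fuel := (T.length + 1) * ((P.length + 1) * T.length) + T.length + 1
  let comb := pvLoopA T P fuel init.1 [] init.2
  if pvHasKey comb P then some (comb.map (fun kv => (String.ofList kv.1, kv.2.map String.ofList))) else none

-- ===== PORT B =====
-- one position i of B's forward DP: if the prefix pattern[:i] is reachable, record all towel edges from i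
def pvStepB (T : List (List Char)) (P : List Char)
    (comb : List (List Char × List (List Char))) (i : Nat) : List (List Char × List (List Char)) :=
  if pvHasKey comb (P.take i) then
    T.foldl
      (fun cb t =>
        if t.isPrefixOf (P.drop i) then pvCombAdd cb (P.take (i + t.length)) (pvEdge (P.take i) t)
        else cb)
      comb
  else comb

def pattern_match_alt (towels : List String) (pattern : String) : Option (List (String × List String)) :=
  let T := towels.map String.toList
  let P := pattern.toList
  let base := T.foldl (fun cb t => if t.isPrefixOf P then pvCombSet cb t [t] else cb) []
  let comb := (List.range P.length).foldl (pvStepB T P) base  -- for i in range(n)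
  if pvHasKey comb P then some (comb.map (fun kv => (String.ofList kv.1, kv.2.map String.ofList))) else none

-- ===== PRECONDITION & SPEC =====
def Spec_pattern_match (towels : List String) (pattern : String) (out : Option (List (String × List String))) : Prop := out = pattern_match_alt towels pattern
instance (towels : List String) (pattern : String) (out : Option (List (String × List String))) : Decidable (Spec_pattern_match towels pattern out) := by unfold Spec_pattern_match; infer_instance

-- ===== CLAIM (what is proved, stated in full; the proofs are below) =====
def Claim_equal_pattern_match : Prop := ∀ (towels : List String) (pattern : String), Dom_pattern_match towels pattern → Spec_pattern_match towels pattern (pattern_match towels pattern)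

-- ===== LEMMAS AND PROOFS =====

-- ===== proof-side definitions =====
def pvBase (T : List (List Char)) (P : List Char) : List (List Char × List (List Char)) :=
  T.foldl (fun cb t => if t.isPrefixOf P then pvCombSet cb t [t] else cb) []

def pvC (T : List (List Char)) (P : List Char) (k : Nat) : List (List Char × List (List Char)) :=
  (List.range k).foldl (pvStepB T P) (pvBase T P)

def pvGuard (T : List (List Char)) (P : List Char) (cb : List (List Char × List (List Char))) (i : Nat) : Bool :=
  pvHasKey cb (P.take i)

def pvInner (T : List (List Char)) (P : List Char) (i : Nat) (cb : List (List Char × List (List Char))) : List (List Char × List (List Char)) :=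
  T.foldl
    (fun cb t =>
      if t.isPrefixOf (P.drop i) then pvCombAdd cb (P.take (i + t.length)) (pvEdge (P.take i) t)
      else cb)
    cb

def pvOwns (cb : List (List Char × List (List Char))) (k e : List Char) : Prop :=
  ∃ v, pvLookup cb k = some v ∧ e ∈ v

theorem pvStepB_eq (T : List (List Char)) (P : List Char) (cb : List (List Char × List (List Char))) (i : Nat) :
    pvStepB T P cb i = if pvGuard T P cb i then pvInner T P i cb else cb := rfl

theorem pvC_succ (T : List (List Char)) (P : List Char) (k : Nat) :
    pvC T P (k + 1) = pvStepB T P (pvC T P k) k := by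
  simp [pvC, List.range_succ]

-- lookup/combSet/combAdd basics
theorem pvLookup_combSet_self (cb : List (List Char × List (List Char))) (k : List Char) (v : List (List Char)) :
    pvLookup (pvCombSet cb k v) k = some v := by
  induction cb with
  | nil => simp [pvCombSet, pvLookup]
  | cons hd tl ih =>
    obtain ⟨k', v'⟩ := hd
    by_cases h : k' = k <;> simp [pvCombSet, pvLookup, h, ih]

theorem pvLookup_combSet_ne (cb : List (List Char × List (List Char))) (k k' : List Char) (v : List (List Char))
    (h : k' ≠ k) : pvLookup (pvCombSet cb k v) k' = pvLookup cb k' := by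
  induction cb with
  | nil => simp [pvCombSet, pvLookup, Ne.symm h]
  | cons hd tl ih =>
    obtain ⟨k'', v''⟩ := hd
    by_cases h2 : k'' = k
    · subst h2; simp [pvCombSet, pvLookup, Ne.symm h]
    · by_cases h3 : k'' = k' <;> simp [pvCombSet, pvLookup, h2, h3, ih, Ne.symm h, h]

theorem pvLookup_combAdd_self (cb : List (List Char × List (List Char))) (k e : List Char) :
    pvLookup (pvCombAdd cb k e) k = some (pvSetAdd ((pvLookup cb k).getD []) e) := by
  induction cb with
  | nil => simp [pvCombAdd, pvLookup, pvSetAdd]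
  | cons hd tl ih =>
    obtain ⟨k', v'⟩ := hd
    by_cases h : k' = k <;> simp [pvCombAdd, pvLookup, h, ih]

theorem pvLookup_combAdd_ne (cb : List (List Char × List (List Char))) (k k' e : List Char)
    (h : k' ≠ k) : pvLookup (pvCombAdd cb k e) k' = pvLookup cb k' := by
  induction cb with
  | nil => simp [pvCombAdd, pvLookup, Ne.symm h]
  | cons hd tl ih =>
    obtain ⟨k'', v''⟩ := hd
    by_cases h2 : k'' = k
    · subst h2; simp [pvCombAdd, pvLookup, Ne.symm h]
    · by_cases h3 : k'' = k' <;> simp [pvCombAdd, pvLookup, h2, h3, ih, Ne.symm h, h]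

theorem pvCombAdd_noop (cb : List (List Char × List (List Char))) (k e : List Char) (v : List (List Char))
    (hl : pvLookup cb k = some v) (he : e ∈ v) : pvCombAdd cb k e = cb := by
  induction cb with
  | nil => simp [pvLookup] at hl
  | cons hd tl ih =>
    obtain ⟨k', v'⟩ := hd
    by_cases h : k' = k
    · subst h
      simp [pvLookup] at hl
      subst hl
      simp [pvCombAdd, pvSetAdd, he]
    · simp [pvLookup, h] at hl
      simp [pvCombAdd, h, ih hl]

theorem pvOwns_combAdd_self (cb : List (List Char × List (List Char))) (k e : List Char) :
    pvOwns (pvCombAdd cb k e) k e := by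
  refine ⟨_, pvLookup_combAdd_self cb k e, ?_⟩
  by_cases h : e ∈ (pvLookup cb k).getD [] <;> simp [pvSetAdd, h]

theorem pvOwns_mono_combAdd (cb : List (List Char × List (List Char))) (k e k' e' : List Char)
    (h : pvOwns cb k e) : pvOwns (pvCombAdd cb k' e') k e := by
  obtain ⟨v, hv, he⟩ := h
  by_cases hk : k = k'
  · subst hk
    refine ⟨_, pvLookup_combAdd_self cb k e', ?_⟩
    rw [hv]
    simp only [Option.getD_some, pvSetAdd]
    by_cases h2 : e' ∈ v
    · simp [h2, he]
    · simp [h2, he]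
  · exact ⟨v, by rw [pvLookup_combAdd_ne cb k' k e' hk, hv], he⟩

theorem pvHasKey_combAdd (cb : List (List Char × List (List Char))) (k k' e : List Char) :
    pvHasKey (pvCombAdd cb k' e) k = (pvHasKey cb k || decide (k = k')) := by
  by_cases h : k = k'
  · subst h; simp [pvHasKey, pvLookup_combAdd_self]
  · simp [pvHasKey, pvLookup_combAdd_ne cb k' k e h, h]

theorem pvHasKey_combSet (cb : List (List Char × List (List Char))) (k k' : List Char) (v : List (List Char)) :
    pvHasKey (pvCombSet cb k' v) k = (pvHasKey cb k || decide (k = k')) := by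
  by_cases h : k = k'
  · subst h; simp [pvHasKey, pvLookup_combSet_self]
  · simp [pvHasKey, pvLookup_combSet_ne cb k' k v h, h]

-- generic fold lemmas
theorem pvFoldPairFst {α β γ : Type} (l : List γ) (F : α × β → γ → α × β) (f : α → γ → α)
    (h : ∀ s t, (F s t).1 = f s.1 t) : ∀ (a : α) (b : β), (l.foldl F (a, b)).1 = l.foldl f a := by
  induction l with
  | nil => intro a b; rfl
  | cons hd tl ih =>
    intro a b
    simp only [List.foldl]
    rw [show F (a, b) hd = ((F (a, b) hd).1, (F (a, b) hd).2) from rfl, ih, h]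

theorem pvOwns_foldl {γ : Type} (l : List γ) (f : List (List Char × List (List Char)) → γ → List (List Char × List (List Char)))
    (hstep : ∀ cb t k e, pvOwns cb k e → pvOwns (f cb t) k e) :
    ∀ cb k e, pvOwns cb k e → pvOwns (l.foldl f cb) k e := by
  induction l with
  | nil => intro cb k e h; exact h
  | cons hd tl ih => intro cb k e h; exact ih _ _ _ (hstep _ _ _ _ h)

theorem pvHasKey_foldl {γ : Type} (l : List γ) (f : List (List Char × List (List Char)) → γ → List (List Char × List (List Char)))
    (hstep : ∀ cb t k, pvHasKey cb k = true → pvHasKey (f cb t) k = true) :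
    ∀ cb k, pvHasKey cb k = true → pvHasKey (l.foldl f cb) k = true := by
  induction l with
  | nil => intro cb k h; exact h
  | cons hd tl ih => intro cb k h; exact ih _ _ (hstep _ _ _ h)

-- prefix shifting
theorem pvPrefixShift (P t : List Char) (i : Nat) (hi : i ≤ P.length) :
    (P.take i ++ t).isPrefixOf P = t.isPrefixOf (P.drop i) := by
  have h := List.take_append_drop i P
  rw [Bool.eq_iff_iff]
  simp only [List.isPrefixOf_iff_prefix]
  constructor
  · intro hp
    have hp2 : P.take i ++ t <+: P.take i ++ P.drop i := by rw [h]; exact hp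
    exact (List.prefix_append_right_inj (P.take i)).mp hp2
  · intro hp
    conv_rhs => rw [← h]
    exact (List.prefix_append_right_inj (P.take i)).mpr hp

theorem pvTakeAdd (P t : List Char) (i : Nat) (h : t.isPrefixOf (P.drop i) = true) :
    P.take (i + t.length) = P.take i ++ t := by
  rw [List.take_add]
  congr 1
  rw [List.isPrefixOf_iff_prefix] at h
  exact (List.prefix_iff_eq_take.mp h).symm

theorem pvPrefixLen (P t : List Char) (i : Nat) (h : t.isPrefixOf (P.drop i) = true) (hi : i ≤ P.length) :
    i + t.length ≤ P.length := by
  rw [List.isPrefixOf_iff_prefix] at h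
  have := h.length_le
  simp at this
  omega

theorem pvTakeInj (P : List Char) (a b : Nat) (ha : a ≤ P.length) (hb : b ≤ P.length)
    (h : P.take a = P.take b) : a = b := by
  have := congrArg List.length h
  simp [List.length_take] at this
  omega

-- the expand fold's first component
theorem pvExpand_fst (T : List (List Char)) (P prog : List Char) (comb : List (List Char × List (List Char))) :
    (pvExpand T P prog comb).1 =
      T.foldl
        (fun cb t => if (prog ++ t).isPrefixOf P then pvCombAdd cb (prog ++ t) (pvEdge prog t) else cb)
        comb := by
  unfold pvExpand
  rw [pvFoldPairFst]
  intro s t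
  by_cases h : (prog ++ t).isPrefixOf P <;> simp [h]

theorem pvExpand_eq_inner (T : List (List Char)) (P : List Char) (i : Nat) (hi : i ≤ P.length)
    (comb : List (List Char × List (List Char))) :
    (pvExpand T P (P.take i) comb).1 = pvInner T P i comb := by
  rw [pvExpand_fst]
  unfold pvInner
  have : (fun cb t => if (P.take i ++ t).isPrefixOf P then pvCombAdd cb (P.take i ++ t) (pvEdge (P.take i) t) else cb) =
      (fun cb t => if t.isPrefixOf (P.drop i) then pvCombAdd cb (P.take (i + t.length)) (pvEdge (P.take i) t) else cb) := by
    funext cb t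
    rw [pvPrefixShift P t i hi]
    by_cases h : t.isPrefixOf (P.drop i)
    · rw [if_pos h, if_pos h, pvTakeAdd P t i h]
    · rw [if_neg (by simp [h]), if_neg (by simp [h])]
  rw [this]

-- monotonicity of pvInner / pvStepB / pvC
theorem pvOwns_inner (T : List (List Char)) (P : List Char) (i : Nat) (cb : List (List Char × List (List Char)))
    (k e : List Char) (h : pvOwns cb k e) : pvOwns (pvInner T P i cb) k e := by
  refine pvOwns_foldl T _ ?_ cb k e h
  intro cb' t k' e' h'
  by_cases hc : t.isPrefixOf (P.drop i) <;> simp [hc]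
  · exact pvOwns_mono_combAdd _ _ _ _ _ h'
  · exact h'

theorem pvOwns_stepB (T : List (List Char)) (P : List Char) (i : Nat) (cb : List (List Char × List (List Char)))
    (k e : List Char) (h : pvOwns cb k e) : pvOwns (pvStepB T P cb i) k e := by
  rw [pvStepB_eq]
  by_cases hg : pvGuard T P cb i <;> simp [hg]
  · exact pvOwns_inner _ _ _ _ _ _ h
  · exact h

theorem pvOwns_C_mono (T : List (List Char)) (P : List Char) (a b : Nat) (hab : a ≤ b)
    (k e : List Char) (h : pvOwns (pvC T P a) k e) : pvOwns (pvC T P b) k e := by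
  induction b with
  | zero => have : a = 0 := by omega
            subst this; exact h
  | succ b ih =>
    rcases Nat.lt_or_ge a (b+1) with hlt | hge
    · rw [pvC_succ]
      exact pvOwns_stepB _ _ _ _ _ _ (ih (by omega))
    · have : a = b + 1 := by omega
      subst this; exact h

theorem pvHasKey_inner (T : List (List Char)) (P : List Char) (i : Nat) (cb : List (List Char × List (List Char)))
    (k : List Char) (h : pvHasKey cb k = true) : pvHasKey (pvInner T P i cb) k = true := by
  refine pvHasKey_foldl T _ ?_ cb k h
  intro cb' t k' h'
  by_cases hc : t.isPrefixOf (P.drop i) <;> simp [hc, pvHasKey_combAdd, h']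

theorem pvHasKey_stepB (T : List (List Char)) (P : List Char) (i : Nat) (cb : List (List Char × List (List Char)))
    (k : List Char) (h : pvHasKey cb k = true) : pvHasKey (pvStepB T P cb i) k = true := by
  rw [pvStepB_eq]
  by_cases hg : pvGuard T P cb i <;> simp [hg]
  · exact pvHasKey_inner _ _ _ _ _ h
  · exact h

theorem pvHasKey_C_mono (T : List (List Char)) (P : List Char) (a b : Nat) (hab : a ≤ b)
    (k : List Char) (h : pvHasKey (pvC T P a) k = true) : pvHasKey (pvC T P b) k = true := by
  induction b with
  | zero => have : a = 0 := by omega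
            subst this; exact h
  | succ b ih =>
    rcases Nat.lt_or_ge a (b+1) with hlt | hge
    · rw [pvC_succ]
      exact pvHasKey_stepB _ _ _ _ _ (ih (by omega))
    · have : a = b + 1 := by omega
      subst this; exact h

-- key provenance
theorem pvBaseFold_key (T : List (List Char)) (P : List Char) (cb0 : List (List Char × List (List Char))) (key : List Char)
    (h : pvHasKey (T.foldl (fun cb t => if t.isPrefixOf P then pvCombSet cb t [t] else cb) cb0) key = true) :
    pvHasKey cb0 key = true ∨ (key ∈ T ∧ key.isPrefixOf P = true) := by
  induction T generalizing cb0 with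
  | nil => exact Or.inl h
  | cons hd tl ih =>
    simp only [List.foldl] at h
    rcases ih _ h with h2 | ⟨ht, hp⟩
    · by_cases hc : hd.isPrefixOf P
      · rw [if_pos hc, pvHasKey_combSet] at h2
        rcases Bool.or_eq_true_iff.mp h2 with h3 | h3
        · exact Or.inl h3
        · have : key = hd := of_decide_eq_true h3
          subst this
          exact Or.inr ⟨by simp, hc⟩
      · rw [if_neg (by simp [hc])] at h2
        exact Or.inl h2
    · exact Or.inr ⟨by simp [ht], hp⟩

theorem pvBase_key (T : List (List Char)) (P : List Char) (key : List Char)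
    (h : pvHasKey (pvBase T P) key = true) : key ∈ T ∧ key.isPrefixOf P = true := by
  rcases pvBaseFold_key T P [] key h with h2 | h2
  · simp [pvHasKey, pvLookup] at h2
  · exact h2

theorem pvInner_key (T : List (List Char)) (P : List Char) (i : Nat) (cb : List (List Char × List (List Char)))
    (key : List Char) (h : pvHasKey (pvInner T P i cb) key = true) :
    pvHasKey cb key = true ∨ ∃ t, t ∈ T ∧ t.isPrefixOf (P.drop i) = true ∧ key = P.take (i + t.length) := by
  unfold pvInner at h
  induction T generalizing cb with
  | nil => exact Or.inl h
  | cons hd tl ih =>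
    simp only [List.foldl] at h
    rcases ih _ h with h2 | ⟨t, ht, hp, hk⟩
    · by_cases hc : hd.isPrefixOf (P.drop i)
      · rw [if_pos hc, pvHasKey_combAdd] at h2
        rcases Bool.or_eq_true_iff.mp h2 with h3 | h3
        · exact Or.inl h3
        · exact Or.inr ⟨hd, by simp, hc, of_decide_eq_true h3⟩
      · rw [if_neg (by simp [hc])] at h2
        exact Or.inl h2
    · exact Or.inr ⟨t, by simp [ht], hp, hk⟩

-- base towels are keys
theorem pvBaseFold_mem (T : List (List Char)) (P : List Char) (t : List Char) (ht : t ∈ T)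
    (hp : t.isPrefixOf P = true) :
    ∀ cb0, pvHasKey (T.foldl (fun cb t => if t.isPrefixOf P then pvCombSet cb t [t] else cb) cb0) t = true := by
  induction T with
  | nil => simp at ht
  | cons hd tl ih =>
    intro cb0
    simp only [List.foldl]
    rcases List.mem_cons.mp ht with h2 | h2
    · subst h2
      rw [if_pos hp]
      refine pvHasKey_foldl tl _ ?_ _ _ (by simp [pvHasKey_combSet])
      intro cb t' k hk
      by_cases hc : t'.isPrefixOf P <;> simp [hc, pvHasKey_combSet, hk]
    · exact ih h2 _

theorem pvBase_mem (T : List (List Char)) (P : List Char) (t : List Char) (ht : t ∈ T)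
    (hp : t.isPrefixOf P = true) : pvHasKey (pvBase T P) t = true :=
  pvBaseFold_mem T P t ht hp []

-- a key discovered before step j means step j's guard fired when B reached it
theorem pvDiscovered_early (T : List (List Char)) (P : List Char) :
    ∀ k j, k ≤ P.length → j < k → pvHasKey (pvC T P k) (P.take j) = true →
      pvGuard T P (pvC T P j) j = true := by
  intro k
  induction k with
  | zero => intro j _ hj; omega
  | succ k ih =>
    intro j hk hj h
    rw [pvC_succ, pvStepB_eq] at h
    by_cases hg : pvGuard T P (pvC T P k) k
    · rw [if_pos hg] at h
      rcases pvInner_key T P k _ _ h with h2 | ⟨t, ht, hp, hkey⟩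
      · rcases Nat.lt_or_ge j k with hlt | hge
        · exact ih j (by omega) hlt h2
        · have : j = k := by omega
          subst this
          exact h2
      · have hlen : k + t.length ≤ P.length := pvPrefixLen P t k hp (by omega)
        have hjk : j = k + t.length := pvTakeInj P j (k + t.length) (by omega) hlen hkey
        have : j = k := by omega
        subst this
        exact hg
    · rw [if_neg hg] at h
      rcases Nat.lt_or_ge j k with hlt | hge
      · exact ih j (by omega) hlt h
      · have : j = k := by omega
        subst this
        exact h

-- pvC is unchanged over a run of unfired positions
theorem pvC_stable (T : List (List Char)) (P : List Char) (k : Nat) :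
    ∀ j, k ≤ j → (∀ m, k ≤ m → m < j → pvGuard T P (pvC T P k) m = false) → pvC T P j = pvC T P k := by
  intro j
  induction j with
  | zero => intro h _; have : k = 0 := by omega
            rw [this]
  | succ j ih =>
    intro hkj hall
    rcases Nat.lt_or_ge k (j+1) with hlt | hge
    · have hj : k ≤ j := by omega
      have hC : pvC T P j = pvC T P k := ih hj (fun m hm hmj => hall m hm (by omega))
      rw [pvC_succ, hC, pvStepB_eq, if_neg (by simp [hall j hj (by omega)])]
    · have : k = j + 1 := by omega
      rw [this]

-- all matching edges out of a fired position are present afterwards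
theorem pvInner_edge (T : List (List Char)) (P : List Char) (i : Nat) :
    ∀ (l : List (List Char)) (cb : List (List Char × List (List Char))) (t : List Char), t ∈ l →
      t.isPrefixOf (P.drop i) = true →
      pvOwns (l.foldl (fun cb t => if t.isPrefixOf (P.drop i) then pvCombAdd cb (P.take (i + t.length)) (pvEdge (P.take i) t) else cb) cb)
        (P.take (i + t.length)) (pvEdge (P.take i) t) := by
  intro l
  induction l with
  | nil => intro cb t ht; simp at ht
  | cons hd tl ih =>
    intro cb t ht hp
    rcases List.mem_cons.mp ht with h2 | h2
    · subst h2
      simp only [List.foldl, if_pos hp]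
      refine pvOwns_foldl tl _ ?_ _ _ _ (pvOwns_combAdd_self _ _ _)
      intro cb' t' k' e' h'
      by_cases hc : t'.isPrefixOf (P.drop i) <;> simp [hc]
      · exact pvOwns_mono_combAdd _ _ _ _ _ h'
      · exact h'
    · exact ih _ t h2 hp

theorem pvFired_edges (T : List (List Char)) (P : List Char) (i : Nat) (hi : i ≤ P.length)
    (hg : pvGuard T P (pvC T P i) i = true) (t : List Char) (ht : t ∈ T)
    (hp : t.isPrefixOf (P.drop i) = true) :
    pvOwns (pvC T P (i + 1)) (P.take (i + t.length)) (pvEdge (P.take i) t) := by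
  rw [pvC_succ, pvStepB_eq, if_pos hg]
  exact pvInner_edge T P i T _ t ht hp

-- an expansion whose edges are all present leaves the dict unchanged
theorem pvExpand_noop (T : List (List Char)) (P prog : List Char) (cb : List (List Char × List (List Char)))
    (h : ∀ t ∈ T, (prog ++ t).isPrefixOf P = true → pvOwns cb (prog ++ t) (pvEdge prog t)) :
    (pvExpand T P prog cb).1 = cb := by
  rw [pvExpand_fst]
  induction T with
  | nil => rfl
  | cons hd tl ih =>
    simp only [List.foldl]
    by_cases hc : (prog ++ hd).isPrefixOf P
    · rw [if_pos hc]
      obtain ⟨v, hv, he⟩ := h hd (by simp) hc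
      rw [pvCombAdd_noop cb _ _ v hv he]
      exact ih (fun t ht hp => h t (by simp [ht]) hp)
    · rw [if_neg (by simp [hc])]
      exact ih (fun t ht hp => h t (by simp [ht]) hp)

-- facts about the queue entries produced by pvExpand
theorem pvExpandFold_sub (P prog : List Char) (l : List (List Char)) :
    ∀ (cb : List (List Char × List (List Char))) (q : List (Nat × List Char × List Char)) (x : Nat × List Char × List Char),
      x ∈ q →
      x ∈ (l.foldl
        (fun s t =>
          let pi := prog ++ t
          if pi.isPrefixOf P then
            let cb := pvCombAdd s.1 pi (pvEdge prog t)
            (cb, s.2 ++ [(((pvLookup cb pi).getD []).length, t, pi)])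
          else s)
        (cb, q)).2 := by
  induction l with
  | nil => intro cb q x hx; exact hx
  | cons hd tl ih =>
    intro cb q x hx
    simp only [List.foldl]
    by_cases h : (prog ++ hd).isPrefixOf P <;> simp only [h, if_pos, if_neg, Bool.false_eq_true, reduceIte]
    · exact ih _ _ x (by simp [hx])
    · exact ih _ _ x hx

theorem pvExpandFold_len (P prog : List Char) (l : List (List Char)) :
    ∀ (cb : List (List Char × List (List Char))) (q : List (Nat × List Char × List Char)),
      (l.foldl
        (fun s t =>
          let pi := prog ++ t
          if pi.isPrefixOf P then
            let cb := pvCombAdd s.1 pi (pvEdge prog t)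
            (cb, s.2 ++ [(((pvLookup cb pi).getD []).length, t, pi)])
          else s)
        (cb, q)).2.length ≤ q.length + l.length := by
  induction l with
  | nil => intro cb q; simp
  | cons hd tl ih =>
    intro cb q
    simp only [List.foldl]
    by_cases h : (prog ++ hd).isPrefixOf P <;> simp only [h, if_pos, if_neg, Bool.false_eq_true, reduceIte]
    · refine le_trans (ih _ _) (by simp; omega)
    · refine le_trans (ih _ _) (by simp)

theorem pvSetAdd_len (v : List (List Char)) (e : List Char) : 1 ≤ (pvSetAdd v e).length := by
  unfold pvSetAdd
  by_cases h : e ∈ v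
  · simpa [h] using List.length_pos_of_mem h
  · simp [h]

theorem pvExpandFold_mem (P prog : List Char) (l : List (List Char)) :
    ∀ (cb : List (List Char × List (List Char))) (q : List (Nat × List Char × List Char))
      (x : Nat × List Char × List Char),
      x ∈ (l.foldl
        (fun s t =>
          let pi := prog ++ t
          if pi.isPrefixOf P then
            let cb := pvCombAdd s.1 pi (pvEdge prog t)
            (cb, s.2 ++ [(((pvLookup cb pi).getD []).length, t, pi)])
          else s)
        (cb, q)).2 →
      x ∈ q ∨ ∃ t, t ∈ l ∧ (prog ++ t).isPrefixOf P = true ∧ x.2.1 = t ∧ x.2.2 = prog ++ t ∧ 1 ≤ x.1 := by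
  induction l with
  | nil => intro cb q x hx; exact Or.inl hx
  | cons hd tl ih =>
    intro cb q x hx
    simp only [List.foldl] at hx
    by_cases h : (prog ++ hd).isPrefixOf P
    · rw [if_pos h] at hx
      rcases ih _ _ x hx with h2 | ⟨t, ht, hp, h1, h2, h3⟩
      · rcases List.mem_append.mp h2 with h3 | h3
        · exact Or.inl h3
        · simp at h3
          refine Or.inr ⟨hd, by simp, h, ?_⟩
          rw [h3]
          refine ⟨rfl, rfl, ?_⟩
          rw [pvLookup_combAdd_self]
          exact pvSetAdd_len _ _
      · exact Or.inr ⟨t, by simp [ht], hp, h1, h2, h3⟩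
    · rw [if_neg (by simp [h])] at hx
      rcases ih _ _ x hx with h2 | ⟨t, ht, hp, hrest⟩
      · exact Or.inl h2
      · exact Or.inr ⟨t, by simp [ht], hp, hrest⟩

theorem pvExpandFold_newkey (P prog : List Char) (l : List (List Char)) :
    ∀ (cb : List (List Char × List (List Char))) (q : List (Nat × List Char × List Char)) (key : List Char),
      pvHasKey (l.foldl
        (fun s t =>
          let pi := prog ++ t
          if pi.isPrefixOf P then
            let cb := pvCombAdd s.1 pi (pvEdge prog t)
            (cb, s.2 ++ [(((pvLookup cb pi).getD []).length, t, pi)])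
          else s)
        (cb, q)).1 key = true →
      pvHasKey cb key = false →
      ∃ t, (1, t, key) ∈ (l.foldl
        (fun s t =>
          let pi := prog ++ t
          if pi.isPrefixOf P then
            let cb := pvCombAdd s.1 pi (pvEdge prog t)
            (cb, s.2 ++ [(((pvLookup cb pi).getD []).length, t, pi)])
          else s)
        (cb, q)).2 := by
  induction l with
  | nil =>
    intro cb q key h1 h2
    simp only [List.foldl] at h1
    exact absurd h1 (by simp [h2])
  | cons hd tl ih =>
    intro cb q key h1 h2
    simp only [List.foldl] at h1 ⊢
    by_cases h : (prog ++ hd).isPrefixOf P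
    · rw [if_pos h] at h1 ⊢
      by_cases hkey : pvHasKey (pvCombAdd cb (prog ++ hd) (pvEdge prog hd)) key
      · -- key appeared at this head step: key = prog ++ hd and it was new
        have hk2 : key = prog ++ hd := by
          rw [pvHasKey_combAdd, h2] at hkey
          simpa using hkey
        subst hk2
        refine ⟨hd, ?_⟩
        apply pvExpandFold_sub
        have : pvLookup cb (prog ++ hd) = none := by
          unfold pvHasKey at h2
          exact Option.not_isSome_iff_eq_none.mp (by simp [h2])
        rw [pvLookup_combAdd_self, this]
        simp [pvSetAdd]
      · exact ih _ _ key h1 (by simpa using hkey)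
    · rw [if_neg (by simp [h])] at h1 ⊢
      exact ih _ _ key h1 h2

theorem pvOwns_hasKey (cb : List (List Char × List (List Char))) (k e : List Char)
    (h : pvOwns cb k e) : pvHasKey cb k = true := by
  obtain ⟨v, hv, _⟩ := h
  simp [pvHasKey, hv]

-- priority-queue pop lemmas
theorem pvPopMin_none (q : List (Nat × List Char × List Char)) : pvPopMin q = none ↔ q = [] := by
  cases q with
  | nil => simp [pvPopMin]
  | cons x xs =>
    simp only [pvPopMin]
    cases h : pvPopMin xs with
    | none => simp
    | some m =>
      by_cases hc : x.1 < m.1.1 ∨ (x.1 = m.1.1 ∧ x.2.2.length ≤ m.1.2.2.length) <;> simp [hc]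

theorem pvPopMin_split (q : List (Nat × List Char × List Char)) (x : Nat × List Char × List Char)
    (r : List (Nat × List Char × List Char)) (h : pvPopMin q = some (x, r)) :
    ∃ l1 l2, q = l1 ++ x :: l2 ∧ r = l1 ++ l2 := by
  induction q generalizing x r with
  | nil => simp [pvPopMin] at h
  | cons y ys ih =>
    simp only [pvPopMin] at h
    cases h2 : pvPopMin ys with
    | none =>
      rw [h2] at h
      simp at h
      obtain ⟨hx, hr⟩ := h
      exact ⟨[], ys, by simp [hx, (pvPopMin_none ys).mp h2, hr]⟩
    | some m =>
      obtain ⟨mx, mr⟩ := m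
      simp only [h2] at h
      by_cases hc : y.1 < mx.1 ∨ (y.1 = mx.1 ∧ y.2.2.length ≤ mx.2.2.length)
      · rw [if_pos hc] at h
        simp at h
        obtain ⟨hx, hr⟩ := h
        exact ⟨[], ys, by simp [hx, hr]⟩
      · rw [if_neg hc] at h
        simp at h
        obtain ⟨hx, hr⟩ := h
        obtain ⟨l1, l2, hq, hrest⟩ := ih mx mr h2
        subst hx
        exact ⟨y :: l1, l2, by simp [hq], by simp [hrest, ← hr]⟩

theorem pvPopMin_min (q : List (Nat × List Char × List Char)) (x : Nat × List Char × List Char)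
    (r : List (Nat × List Char × List Char)) (h : pvPopMin q = some (x, r)) :
    ∀ y ∈ q, x.1 < y.1 ∨ (x.1 = y.1 ∧ x.2.2.length ≤ y.2.2.length) := by
  induction q generalizing x r with
  | nil => simp [pvPopMin] at h
  | cons z zs ih =>
    simp only [pvPopMin] at h
    cases h2 : pvPopMin zs with
    | none =>
      rw [h2] at h
      simp at h
      obtain ⟨hx, _⟩ := h
      subst hx
      intro y hy
      rcases List.mem_cons.mp hy with h3 | h3
      · subst h3; omega
      · rw [(pvPopMin_none zs).mp h2] at h3; simp at h3
    | some m =>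
      obtain ⟨mx, mr⟩ := m
      simp only [h2] at h
      have ihm := ih mx mr h2
      by_cases hc : z.1 < mx.1 ∨ (z.1 = mx.1 ∧ z.2.2.length ≤ mx.2.2.length)
      · rw [if_pos hc] at h
        simp at h
        obtain ⟨hx, _⟩ := h
        subst hx
        intro y hy
        rcases List.mem_cons.mp hy with h3 | h3
        · subst h3; omega
        · have := ihm y h3
          omega
      · rw [if_neg hc] at h
        simp at h
        obtain ⟨hx, _⟩ := h
        subst hx
        intro y hy
        rcases List.mem_cons.mp hy with h3 | h3
        · subst h3; push_neg at hc; omega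
        · exact ihm y h3

theorem pvMem_rest (l1 l2 : List (Nat × List Char × List Char)) (x y : Nat × List Char × List Char)
    (hy : y ∈ l1 ++ x :: l2) (hne : y ≠ x) : y ∈ l1 ++ l2 := by
  rcases List.mem_append.mp hy with h | h
  · exact List.mem_append.mpr (Or.inl h)
  · rcases List.mem_cons.mp h with h2 | h2
    · exact absurd h2 hne
    · exact List.mem_append.mpr (Or.inr h2)

-- the unvisited-pair counter used for fuel
def pvUPairs (T : List (List Char)) (P : List Char) : List (List Char × List Char) :=
  (List.range (P.length + 1)).flatMap (fun j => (PySem.Set.ofList T).map (fun t => (P.take j, t)))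

def pvUnv (T : List (List Char)) (P : List Char) (visited : List (List Char × List Char)) : Nat :=
  (pvUPairs T P).countP (fun pr => !(decide (pr ∈ visited)))

theorem pvCountP_lt {α : Type} (l : List α) (p q : α → Bool) (hpq : ∀ a ∈ l, q a = true → p a = true)
    (x : α) (hx : x ∈ l) (hp : p x = true) (hq : q x = false) : l.countP q < l.countP p := by
  induction l with
  | nil => simp at hx
  | cons hd tl ih =>
    rcases List.mem_cons.mp hx with h | h
    · subst h
      have hle : tl.countP q ≤ tl.countP p := List.countP_mono_left (fun a ha => hpq a (by simp [ha]))
      simp [List.countP_cons, hp, hq]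
      omega
    · have := ih (fun a ha hqa => hpq a (by simp [ha]) hqa) h
      simp only [List.countP_cons]
      by_cases h2 : q hd = true
      · have := hpq hd (by simp) h2
        simp [h2, this]
        omega
      · simp [h2]
        split <;> omega

theorem pvUnv_dec (T : List (List Char)) (P : List Char) (visited : List (List Char × List Char))
    (j : Nat) (t : List Char) (hj : j ≤ P.length) (ht : t ∈ T)
    (hnv : (P.take j, t) ∉ visited) :
    pvUnv T P (visited ++ [(P.take j, t)]) < pvUnv T P visited := by
  apply pvCountP_lt (pvUPairs T P) _ _ ?_ (P.take j, t)
  · unfold pvUPairs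
    simp only [List.mem_flatMap, List.mem_map, List.mem_range]
    exact ⟨j, by omega, t, (PySem.Set.mem_ofList T t).mpr ht, rfl⟩
  · simp [hnv]
  · simp
  · intro a _ h
    simp at h ⊢
    intro h2
    exact absurd h2 (by simp [h.1])

theorem pvUnv_le (T : List (List Char)) (P : List Char) (visited : List (List Char × List Char)) :
    pvUnv T P visited ≤ (P.length + 1) * T.length := by
  calc pvUnv T P visited ≤ (pvUPairs T P).length := List.countP_le_length
    _ ≤ (P.length + 1) * T.length := by
        unfold pvUPairs
        rw [List.length_flatMap]
        have h1 : ∀ j ∈ List.range (P.length + 1),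
            ((PySem.Set.ofList T).map (fun t => (P.take j, t))).length ≤ T.length := by
          intro j _
          rw [List.length_map]
          exact PySem.Set.length_ofList_le T
        calc (List.map (fun j => ((PySem.Set.ofList T).map (fun t => (P.take j, t))).length) (List.range (P.length + 1))).sum
            ≤ (List.map (fun _ => T.length) (List.range (P.length + 1))).sum := by
              apply List.sum_le_sum
              intro j hj
              exact h1 j hj
          _ = (P.length + 1) * T.length := by
              simp [List.map_const', List.sum_replicate, Nat.smul_one_eq_cast]

-- facts about port A's initialisation fold
theorem pvInitFold_fst (T : List (List Char)) (P : List Char) :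
    (T.foldl
      (fun s t =>
        if t.isPrefixOf P then
          let cb := pvCombSet s.1 t [t]
          (cb, s.2 ++ [(((pvLookup cb t).getD []).length, t, t)])
        else s)
      ([], [])).1 = pvBase T P := by
  unfold pvBase
  rw [pvFoldPairFst]
  intro s t
  by_cases h : t.isPrefixOf P <;> simp [h]

theorem pvInitFold_sub (T : List (List Char)) (P : List Char) :
    ∀ (cb : List (List Char × List (List Char))) (q : List (Nat × List Char × List Char))
      (x : Nat × List Char × List Char), x ∈ q →
      x ∈ (T.foldl
        (fun s t =>
          if t.isPrefixOf P then
            let cb := pvCombSet s.1 t [t]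
            (cb, s.2 ++ [(((pvLookup cb t).getD []).length, t, t)])
          else s)
        (cb, q)).2 := by
  induction T with
  | nil => intro cb q x hx; exact hx
  | cons hd tl ih =>
    intro cb q x hx
    simp only [List.foldl]
    by_cases h : hd.isPrefixOf P <;> simp only [h, if_pos, if_neg, Bool.false_eq_true, reduceIte]
    · exact ih _ _ x (by simp [hx])
    · exact ih _ _ x hx

theorem pvInitFold_mem (T : List (List Char)) (P : List Char) :
    ∀ (cb : List (List Char × List (List Char))) (q : List (Nat × List Char × List Char))
      (x : Nat × List Char × List Char),
      x ∈ (T.foldl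
        (fun s t =>
          if t.isPrefixOf P then
            let cb := pvCombSet s.1 t [t]
            (cb, s.2 ++ [(((pvLookup cb t).getD []).length, t, t)])
          else s)
        (cb, q)).2 →
      x ∈ q ∨ ∃ t, t ∈ T ∧ t.isPrefixOf P = true ∧ x = (1, t, t) := by
  induction T with
  | nil => intro cb q x hx; exact Or.inl hx
  | cons hd tl ih =>
    intro cb q x hx
    simp only [List.foldl] at hx
    by_cases h : hd.isPrefixOf P
    · rw [if_pos h] at hx
      rcases ih _ _ x hx with h2 | ⟨t, ht, hp, hx2⟩
      · rcases List.mem_append.mp h2 with h3 | h3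
        · exact Or.inl h3
        · simp at h3
          refine Or.inr ⟨hd, by simp, h, ?_⟩
          rw [h3, pvLookup_combSet_self]
          rfl
      · exact Or.inr ⟨t, by simp [ht], hp, hx2⟩
    · rw [if_neg (by simp [h])] at hx
      rcases ih _ _ x hx with h2 | ⟨t, ht, hp, hx2⟩
      · exact Or.inl h2
      · exact Or.inr ⟨t, by simp [ht], hp, hx2⟩

theorem pvInitFold_node (T : List (List Char)) (P : List Char) (t : List Char) (ht : t ∈ T)
    (hp : t.isPrefixOf P = true) :
    ∀ (cb : List (List Char × List (List Char))) (q : List (Nat × List Char × List Char)),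
      (1, t, t) ∈ (T.foldl
        (fun s t =>
          if t.isPrefixOf P then
            let cb := pvCombSet s.1 t [t]
            (cb, s.2 ++ [(((pvLookup cb t).getD []).length, t, t)])
          else s)
        (cb, q)).2 := by
  induction T with
  | nil => simp at ht
  | cons hd tl ih =>
    intro cb q
    simp only [List.foldl]
    rcases List.mem_cons.mp ht with h2 | h2
    · subst h2
      rw [if_pos hp]
      apply pvInitFold_sub
      rw [pvLookup_combSet_self]
      simp
    · by_cases h : hd.isPrefixOf P <;> simp only [h, if_pos, if_neg, Bool.false_eq_true, reduceIte]
      · exact ih h2 _ _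
      · exact ih h2 _ _

theorem pvInitFold_len (T : List (List Char)) (P : List Char) :
    ∀ (cb : List (List Char × List (List Char))) (q : List (Nat × List Char × List Char)),
      (T.foldl
        (fun s t =>
          if t.isPrefixOf P then
            let cb := pvCombSet s.1 t [t]
            (cb, s.2 ++ [(((pvLookup cb t).getD []).length, t, t)])
          else s)
        (cb, q)).2.length ≤ q.length + T.length := by
  induction T with
  | nil => intro cb q; simp
  | cons hd tl ih =>
    intro cb q
    simp only [List.foldl]
    by_cases h : hd.isPrefixOf P <;> simp only [h, if_pos, if_neg, Bool.false_eq_true, reduceIte]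
    · refine le_trans (ih _ _) (by simp; omega)
    · refine le_trans (ih _ _) (by simp)

-- the main loop invariant: from a state reached after expanding all reachable positions < k,
-- A's worklist loop computes exactly the forward DP's dict
theorem pvLoopA_inv (T : List (List Char)) (P : List Char) :
    ∀ (fuel k : Nat) (comb : List (List Char × List (List Char)))
      (visited : List (List Char × List Char)) (queue : List (Nat × List Char × List Char)),
      k ≤ P.length →
      comb = pvC T P k →
      (∀ x ∈ queue, x.2.1 ∈ T ∧ 1 ≤ x.1 ∧
        ∃ j, j ≤ P.length ∧ x.2.2 = P.take j ∧ pvHasKey (pvC T P k) (P.take j) = true) →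
      (∀ j t, k ≤ j → j ≤ P.length → (P.take j, t) ∉ visited) →
      (∀ j, k ≤ j → j < P.length → pvHasKey (pvC T P k) (P.take j) = true →
        ∃ t, (1, t, P.take j) ∈ queue) →
      queue.length + (T.length + 1) * pvUnv T P visited < fuel →
      pvLoopA T P fuel comb visited queue = pvC T P P.length := by
  intro fuel
  induction fuel with
  | zero => intro k comb visited queue _ _ _ _ _ hfuel; omega
  | succ fuel ih =>
    intro k comb visited queue hk hcomb hqueue hvis hcost1 hfuel
    simp only [pvLoopA]
    cases hpop : pvPopMin queue with
    | none =>
      -- queue empty: nothing reachable is left unexpanded, so pvC stays put up to n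
      have hq : queue = [] := (pvPopMin_none queue).mp hpop
      subst hq
      have hstable : pvC T P P.length = pvC T P k := by
        apply pvC_stable T P k P.length hk
        intro m hm hmn
        by_contra hg
        have hhk : pvHasKey (pvC T P k) (P.take m) = true := by simpa [pvGuard] using hg
        obtain ⟨t, htq⟩ := hcost1 m hm hmn hhk
        simp at htq
      rw [hstable, hcomb]
    | some pr =>
      obtain ⟨⟨c, tw, prog⟩, rest⟩ := pr
      obtain ⟨l1, l2, hqeq, hrest⟩ := pvPopMin_split queue _ _ hpop
      have hmem : (c, tw, prog) ∈ queue := by rw [hqeq]; simp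
      obtain ⟨htwT, hc1, j, hjn, hprogj, hjkey⟩ := hqueue _ hmem
      simp only at hprogj hjkey
      have hmin := pvPopMin_min queue _ _ hpop
      have hqlen : queue.length = rest.length + 1 := by rw [hqeq, hrest]; simp; omega
      show (if prog = P ∨ (prog, tw) ∈ visited then pvLoopA T P fuel comb visited rest
        else pvLoopA T P fuel (pvExpand T P prog comb).1 (visited ++ [(prog, tw)])
          (rest ++ (pvExpand T P prog comb).2)) = pvC T P P.length
      by_cases hskip : prog = P ∨ (prog, tw) ∈ visited
      · -- skip branch
        rw [if_pos hskip]
        apply ih k comb visited rest hk hcomb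
        · intro x hx
          exact hqueue x (by rw [hqeq]; rw [hrest] at hx; rcases List.mem_append.mp hx with h | h <;> simp [h])
        · exact hvis
        · intro j'' hj1 hj2 hj3
          obtain ⟨t'', ht''⟩ := hcost1 j'' hj1 hj2 hj3
          refine ⟨t'', ?_⟩
          rw [hrest]
          rw [hqeq] at ht''
          apply pvMem_rest l1 l2 _ _ ht''
          intro hcontra
          rw [Prod.mk.injEq, Prod.mk.injEq] at hcontra
          obtain ⟨_, htt, hpp⟩ := hcontra
          replace hpp := hpp.symm
          replace htt := htt.symm
          rcases hskip with hP | hV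
          · rw [hP] at hpp
            have : j'' = P.length := by
              have := pvTakeInj P P.length j'' (le_refl _) hj2.le (by rw [← hpp, List.take_length])
              omega
            omega
          · rw [hpp, htt] at hV
            exact hvis j'' t'' hj1 hj2.le hV
        · omega
      · -- expand branch
        rw [if_neg hskip]
        push_neg at hskip
        obtain ⟨hneP, hnvis⟩ := hskip
        have hjltn : j < P.length := by
          rcases Nat.lt_or_ge j P.length with h | h
          · exact h
          · have : j = P.length := by omega
            subst this
            rw [List.take_length] at hprogj
            exact absurd hprogj hneP
        subst hprogj
        -- facts used by both subcases
        have hfuel_arith : ∀ puts : List (Nat × List Char × List Char), puts.length ≤ T.length →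
            (rest ++ puts).length + (T.length + 1) * pvUnv T P (visited ++ [(P.take j, tw)]) < fuel := by
          intro puts hp
          have hdec := pvUnv_dec T P visited j tw (by omega) htwT hnvis
          have hlen2 : (rest ++ puts).length = rest.length + puts.length := by simp
          have hmul : (T.length + 1) * pvUnv T P (visited ++ [(P.take j, tw)]) + (T.length + 1) ≤
              (T.length + 1) * pvUnv T P visited := by
            have : pvUnv T P (visited ++ [(P.take j, tw)]) + 1 ≤ pvUnv T P visited := hdec
            calc (T.length + 1) * pvUnv T P (visited ++ [(P.take j, tw)]) + (T.length + 1)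
                = (T.length + 1) * (pvUnv T P (visited ++ [(P.take j, tw)]) + 1) := by ring
              _ ≤ (T.length + 1) * pvUnv T P visited := Nat.mul_le_mul_left _ this
          omega
        rcases Nat.lt_or_ge j k with hjk | hjk
        · -- an already-expanded position: the expansion changes nothing
          have hfired : pvGuard T P (pvC T P j) j = true := pvDiscovered_early T P k j hk hjk hjkey
          have hedges : ∀ t ∈ T, (P.take j ++ t).isPrefixOf P = true →
              pvOwns (pvC T P k) (P.take j ++ t) (pvEdge (P.take j) t) := by
            intro t ht hpre
            have hdrop : t.isPrefixOf (P.drop j) = true := by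
              rw [← pvPrefixShift P t j (by omega)]; exact hpre
            have h6 := pvFired_edges T P j (by omega) hfired t ht hdrop
            rw [pvTakeAdd P t j hdrop] at h6
            exact pvOwns_C_mono T P (j+1) k (by omega) _ _ h6
          have hnoop : (pvExpand T P (P.take j) comb).1 = comb := by
            apply pvExpand_noop
            rw [hcomb]
            exact hedges
          have hputs := pvExpandFold_mem P (P.take j) T comb []
          have hputlen := pvExpandFold_len P (P.take j) T comb []
          apply ih k _ _ _ hk (by rw [hnoop, hcomb])
          · intro x hx
            rcases List.mem_append.mp hx with h | h
            · exact hqueue x (by rw [hqeq]; rw [hrest] at h; rcases List.mem_append.mp h with h2 | h2 <;> simp [h2])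
            · rcases hputs x h with h2 | ⟨t, htT, hpre, hx1, hx2, hx3⟩
              · simp at h2
              · have hdrop : t.isPrefixOf (P.drop j) = true := by
                  rw [← pvPrefixShift P t j (by omega)]; exact hpre
                refine ⟨by rw [hx1]; exact htT, hx3, j + t.length, pvPrefixLen P t j hdrop (by omega), ?_, ?_⟩
                · rw [hx2, pvTakeAdd P t j hdrop]
                · rw [pvTakeAdd P t j hdrop]
                  exact pvOwns_hasKey _ _ _ (hedges t htT hpre)
          · intro j'' t hj1 hj2
            simp only [List.mem_append, List.mem_singleton]
            push_neg
            refine ⟨hvis j'' t hj1 hj2, ?_⟩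
            intro hcontra
            rw [Prod.mk.injEq] at hcontra
            have : j'' = j := pvTakeInj P j'' j hj2 (by omega) hcontra.1
            omega
          · intro j'' hj1 hj2 hj3
            obtain ⟨t'', ht''⟩ := hcost1 j'' hj1 hj2 hj3
            refine ⟨t'', ?_⟩
            apply List.mem_append.mpr
            left
            rw [hrest]
            rw [hqeq] at ht''
            apply pvMem_rest l1 l2 _ _ ht''
            intro hcontra
            rw [Prod.mk.injEq, Prod.mk.injEq] at hcontra
            have : j'' = j := pvTakeInj P j'' j hj2.le (by omega) hcontra.2.2
            omega
          · exact hfuel_arith _ (le_trans hputlen (by simp))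
        · -- the next unexpanded reachable position: the expansion is exactly B's step j
          -- no reachable position in [k, j) is unexpanded (the popped node is minimal)
          have hnofire : ∀ m, k ≤ m → m < j → pvGuard T P (pvC T P k) m = false := by
            intro m hm hmj
            by_contra hg
            have hhk : pvHasKey (pvC T P k) (P.take m) = true := by simpa [pvGuard] using hg
            obtain ⟨t'', ht''⟩ := hcost1 m hm (by omega) hhk
            have := hmin _ ht''
            simp only at this
            have hlenj : (P.take j).length = j := by simp; omega
            have hlenm : (P.take m).length = m := by simp; omega
            rw [hlenj, hlenm] at this
            omega
          have hCj : pvC T P j = pvC T P k := pvC_stable T P k j hjk hnofire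
          have hfired : pvGuard T P (pvC T P j) j = true := by
            unfold pvGuard
            rw [hCj]
            exact hjkey
          have hCj1 : pvC T P (j + 1) = (pvExpand T P (P.take j) comb).1 := by
            rw [pvC_succ, pvStepB_eq, if_pos hfired, hcomb, ← hCj,
              pvExpand_eq_inner T P j (by omega)]
          have hputs := pvExpandFold_mem P (P.take j) T comb []
          have hputlen := pvExpandFold_len P (P.take j) T comb []
          have hedges1 : ∀ t ∈ T, t.isPrefixOf (P.drop j) = true →
              pvOwns (pvC T P (j+1)) (P.take (j + t.length)) (pvEdge (P.take j) t) :=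
            fun t ht hdrop => pvFired_edges T P j (by omega) hfired t ht hdrop
          apply ih (j + 1) _ _ _ (by omega) hCj1.symm
          · intro x hx
            rcases List.mem_append.mp hx with h | h
            · obtain ⟨hT', hc', j', hj', hprog', hkey'⟩ := hqueue x (by rw [hqeq]; rw [hrest] at h; rcases List.mem_append.mp h with h2 | h2 <;> simp [h2])
              exact ⟨hT', hc', j', hj', hprog', pvHasKey_C_mono T P k (j+1) (by omega) _ hkey'⟩
            · rcases hputs x h with h2 | ⟨t, htT, hpre, hx1, hx2, hx3⟩
              · simp at h2
              · have hdrop : t.isPrefixOf (P.drop j) = true := by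
                  rw [← pvPrefixShift P t j (by omega)]; exact hpre
                refine ⟨by rw [hx1]; exact htT, hx3, j + t.length, pvPrefixLen P t j hdrop (by omega), ?_, ?_⟩
                · rw [hx2, pvTakeAdd P t j hdrop]
                · exact pvOwns_hasKey _ _ _ (hedges1 t htT hdrop)
          · intro j'' t hj1 hj2
            simp only [List.mem_append, List.mem_singleton]
            push_neg
            refine ⟨hvis j'' t (by omega) hj2, ?_⟩
            intro hcontra
            rw [Prod.mk.injEq] at hcontra
            have : j'' = j := pvTakeInj P j'' j hj2 (by omega) hcontra.1
            omega
          · intro j'' hj1 hj2 hj3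
            by_cases hold : pvHasKey (pvC T P k) (P.take j'') = true
            · obtain ⟨t'', ht''⟩ := hcost1 j'' (by omega) hj2 hold
              refine ⟨t'', ?_⟩
              apply List.mem_append.mpr
              left
              rw [hrest]
              rw [hqeq] at ht''
              apply pvMem_rest l1 l2 _ _ ht''
              intro hcontra
              rw [Prod.mk.injEq, Prod.mk.injEq] at hcontra
              have : j'' = j := pvTakeInj P j'' j hj2.le (by omega) hcontra.2.2
              omega
            · have hnew := pvExpandFold_newkey P (P.take j) T comb [] (P.take j'')
                (by rw [hCj1] at hj3; exact hj3)
                (by rw [hcomb]; simpa using hold)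
              obtain ⟨t'', ht''⟩ := hnew
              exact ⟨t'', List.mem_append.mpr (Or.inr ht'')⟩
          · exact hfuel_arith _ (le_trans hputlen (by simp))

theorem pattern_match_eq (towels : List String) (pattern : String) :
    pattern_match towels pattern = pattern_match_alt towels pattern := by
  simp only [pattern_match, pattern_match_alt]
  set T := towels.map String.toList with hT
  set P := pattern.toList with hP
  have hloop : pvLoopA T P ((T.length + 1) * ((P.length + 1) * T.length) + T.length + 1)
      (T.foldl
        (fun s t =>
          if t.isPrefixOf P then
            let cb := pvCombSet s.1 t [t]
            (cb, s.2 ++ [(((pvLookup cb t).getD []).length, t, t)])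
          else s)
        ([], [])).1 []
      (T.foldl
        (fun s t =>
          if t.isPrefixOf P then
            let cb := pvCombSet s.1 t [t]
            (cb, s.2 ++ [(((pvLookup cb t).getD []).length, t, t)])
          else s)
        ([], [])).2 = pvC T P P.length := by
    apply pvLoopA_inv T P _ 0 _ _ _ (Nat.zero_le _)
    · rw [pvInitFold_fst]
      simp [pvC]
    · intro x hx
      rcases pvInitFold_mem T P [] [] x hx with h | ⟨t, htT, hpre, hx1⟩
      · simp at h
      · subst hx1
        have hpfx := List.isPrefixOf_iff_prefix.mp hpre
        have htake : t = P.take t.length := List.prefix_iff_eq_take.mp hpfx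
        refine ⟨htT, le_refl _, t.length, hpfx.length_le, htake, ?_⟩
        rw [← htake]
        have : pvC T P 0 = pvBase T P := by simp [pvC]
        rw [this]
        exact pvBase_mem T P t htT hpre
    · intro j t _ _
      simp
    · intro j _ hjn hkey
      have : pvC T P 0 = pvBase T P := by simp [pvC]
      rw [this] at hkey
      obtain ⟨htT, hpre⟩ := pvBase_key T P (P.take j) hkey
      exact ⟨P.take j, pvInitFold_node T P (P.take j) htT hpre [] []⟩
    · have h1 := pvInitFold_len T P [] []
      rw [List.length_nil, Nat.zero_add] at h1
      have h3 : (T.length + 1) * pvUnv T P [] ≤ (T.length + 1) * ((P.length + 1) * T.length) :=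
        Nat.mul_le_mul_left _ (pvUnv_le T P [])
      have h4 := add_le_add h1 h3
      omega
  rw [hloop]
  rfl

-- ===== VERDICT (by name: the statement is the Claim_ definition above) =====
theorem pattern_match_spec : Claim_equal_pattern_match := by
  intro towels pattern _
  exact pattern_match_eq towels pattern
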